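-- pv_equiv track=rewrite | github.com/ksomemo/Competitive-programming | atcoder/abc/112/C.py | loop_xyh_N
-- ===== SOURCE A (Python) =====
-- def loop_xyh_N(x, y, h):
--     h_base = max(h)
--
--     for cx in range(100 + 1):
--         for cy in range(100 + 1):
--             # 探索範囲100x100より、調査点の候補より200以内
--             for ch in range(h_base, h_base + 200 + 1):
--                 ok = True
--                 for _x, _y, _h in zip(x, y, h):
--                     tmp = _h + abs(_x - cx) + abs(_y - cy)
--                     if _h > 0 and ch != tmp:
--                         ok = False
--                         break
--                     elif _h == 0 and ch > tmp:
--                         ok = False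
--                         break
--
--                 if ok:
--                     return cx, cy, ch
-- ===== SOURCE B (Python) =====
-- def loop_xyh_N(x, y, h):
--     h_base = max(h)
--     pts = list(zip(x, y, h))
--
--     def fits(cx, cy, ch):
--         for _x, _y, _h in pts:
--             tmp = _h + abs(_x - cx) + abs(_y - cy)
--             if _h > 0:
--                 if ch != tmp:
--                     return False
--             elif _h == 0:
--                 if ch > tmp:
--                     return False
--         return True
--
--     pos = next((p for p in pts if p[2] > 0), None)
--     for cx in range(101):
--         for cy in range(101):
--             # the candidate height is forced by any positive measurement;
--             # otherwise the smallest height A would try (h_base) is the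
--             # only one that can pass the 'ch > tmp' checks first.
--             if pos is None:
--                 ch = h_base
--             else:
--                 ch = pos[2] + abs(pos[0] - cx) + abs(pos[1] - cy)
--             if h_base <= ch <= h_base + 200 and fits(cx, cy, ch):
--                 return cx, cy, ch
-- ===== Notes on version B (the rewrite author's own statement) =====
-- stated objective: faster
-- what changed: B eliminates the 201-iteration search over candidate heights ch: for each (cx,cy) the height is forced by the first positive measurement (or is h_base when none exists, the only value the 'ch > tmp' checks can accept first), so B computes it directly and verifies once.
import Mathlib
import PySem

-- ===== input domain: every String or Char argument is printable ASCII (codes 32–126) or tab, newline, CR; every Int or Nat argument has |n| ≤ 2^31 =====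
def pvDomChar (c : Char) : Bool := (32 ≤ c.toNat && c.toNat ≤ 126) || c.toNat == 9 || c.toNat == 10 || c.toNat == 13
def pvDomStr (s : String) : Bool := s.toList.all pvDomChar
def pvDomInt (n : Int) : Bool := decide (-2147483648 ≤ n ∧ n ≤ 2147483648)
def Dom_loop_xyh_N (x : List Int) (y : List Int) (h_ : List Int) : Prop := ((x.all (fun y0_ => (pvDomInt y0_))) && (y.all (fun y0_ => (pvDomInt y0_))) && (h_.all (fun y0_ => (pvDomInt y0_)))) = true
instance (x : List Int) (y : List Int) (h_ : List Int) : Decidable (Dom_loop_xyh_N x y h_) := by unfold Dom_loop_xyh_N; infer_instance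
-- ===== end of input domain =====

-- B removes A's 201-iteration inner search over candidate heights ch by computing the
-- forced height directly from the first positive measurement (or h_base when none exists)
-- and verifying it once per (cx,cy); same return value on all inputs where A returns.

-- ===== PORT A =====
-- A's innermost loop over zip(x,y,h) with its two break conditions, in branch order.
def pvCheckA (cx cy ch : Int) : List (Int × Int × Int) → Bool
  | [] => true
  | (px, py, ph) :: rest =>
    let tmp := ph + |px - cx| + |py - cy|
    if ph > 0 ∧ ch ≠ tmp then false
    else if ph = 0 ∧ ch > tmp then false
    else pvCheckA cx cy ch rest

def loop_xyh_N (x : List Int) (y : List Int) (h_ : List Int) : Option (List Int) :=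
  match PySem.List.max? h_ (fun v => v) with
  | none => none   -- max([]) raises ValueError; excluded by Pre_
  | some hb =>
    (PySem.List.pyRange 0 101 1).findSome? fun cx =>
      (PySem.List.pyRange 0 101 1).findSome? fun cy =>
        (PySem.List.pyRange hb (hb + 200 + 1) 1).findSome? fun ch =>
          if pvCheckA cx cy ch (x.zip (y.zip h_)) then some [cx, cy, ch] else none

-- ===== PORT B =====
-- Source B's 'fits' verifier (a single all-pass over the points).
def pvFitsB (cx cy ch : Int) (pts : List (Int × Int × Int)) : Bool :=
  pts.all fun t =>
    let tmp := t.2.2 + |t.1 - cx| + |t.2.1 - cy|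
    if t.2.2 > 0 then ch == tmp
    else if t.2.2 = 0 then decide (ch ≤ tmp)
    else true

def loop_xyh_N_alt (x : List Int) (y : List Int) (h_ : List Int) : Option (List Int) :=
  match PySem.List.max? h_ (fun v => v) with
  | none => none   -- max([]) raises ValueError; excluded by Pre_
  | some hb =>
    let pts := x.zip (y.zip h_)
    let pos := pts.find? (fun t => t.2.2 > 0)
    (PySem.List.pyRange 0 101 1).findSome? fun cx =>
      (PySem.List.pyRange 0 101 1).findSome? fun cy =>
        let ch := match pos with
          | none => hb
          | some t => t.2.2 + |t.1 - cx| + |t.2.1 - cy|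
        if hb ≤ ch ∧ ch ≤ hb + 200 ∧ pvFitsB cx cy ch pts then some [cx, cy, ch] else none

-- ===== PRECONDITION & SPEC =====
-- Pre_ excludes only the empty height list, on which A raises ValueError in max(h).
def Pre_loop_xyh_N (x : List Int) (y : List Int) (h_ : List Int) : Prop := h_ ≠ []
instance (x : List Int) (y : List Int) (h_ : List Int) : Decidable (Pre_loop_xyh_N x y h_) := by unfold Pre_loop_xyh_N; infer_instance
def pvWitness_loop_xyh_N : List Int × List Int × List Int := ([2], [3], [5])

def Spec_loop_xyh_N (x : List Int) (y : List Int) (h_ : List Int) (out : Option (List Int)) : Prop := out = loop_xyh_N_alt x y h_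
instance (x : List Int) (y : List Int) (h_ : List Int) (out : Option (List Int)) : Decidable (Spec_loop_xyh_N x y h_ out) := by unfold Spec_loop_xyh_N; infer_instance

-- ===== CLAIM (what is proved, stated in full; the proofs are below) =====
def Claim_equal_loop_xyh_N : Prop := ∀ (x : List Int) (y : List Int) (h_ : List Int), Dom_loop_xyh_N x y h_ → Pre_loop_xyh_N x y h_ → Spec_loop_xyh_N x y h_ (loop_xyh_N x y h_)

-- ===== LEMMAS AND PROOFS =====

-- A's break-early check computes the same boolean as B's all-pass verifier.
theorem pvCheckA_eq (cx cy ch : Int) (pts : List (Int × Int × Int)) :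
    pvCheckA cx cy ch pts = pvFitsB cx cy ch pts := by
  induction pts with
  | nil => rfl
  | cons t rest ih =>
    obtain ⟨px, py, ph⟩ := t
    simp only [pvCheckA, pvFitsB, List.all_cons] at *
    split_ifs with h1 h2 <;> simp_all

-- findSome? over a list on which the predicate can only hold at v.
theorem pvFindSome_unique (p : Int → Bool) (f : Int → List Int) (v : Int) (l : List Int)
    (hv : ∀ c ∈ l, p c = true → c = v) :
    l.findSome? (fun c => if p c then some (f c) else none)
      = if v ∈ l ∧ p v = true then some (f v) else none := by
  induction l with
  | nil => simp
  | cons a t ih =>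
    by_cases hpa : p a = true
    · have hav : a = v := hv a (List.mem_cons_self) hpa
      subst hav
      simp [hpa]
    · have hpa' : p a = false := by simpa using hpa
      simp only [List.findSome?_cons, hpa', Bool.false_eq_true, if_false]
      rw [ih (fun c hc hp => hv c (List.mem_cons_of_mem a hc) hp)]
      by_cases hva : v = a
      · subst hva
        simp [hpa']
      · simp [List.mem_cons, hva]

theorem loop_xyh_N_spec' (x y h_ : List Int) :
    loop_xyh_N x y h_ = loop_xyh_N_alt x y h_ := by
  unfold loop_xyh_N loop_xyh_N_alt
  cases hmax : PySem.List.max? h_ (fun v => v) with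
  | none => rfl
  | some hb =>
    simp only []
    apply congrArg (fun f => List.findSome? f _)
    funext cx
    apply congrArg (fun f => List.findSome? f _)
    funext cy
    set pts := x.zip (y.zip h_) with hpts
    cases hpos : pts.find? (fun t => t.2.2 > 0) with
    | some t =>
      obtain ⟨px, py, ph⟩ := t
      have hmem : (px, py, ph) ∈ pts := List.mem_of_find?_eq_some hpos
      have hph : ph > 0 := by
        have := List.find?_some hpos
        simpa using this
      set v : Int := ph + |px - cx| + |py - cy| with hv
      have huniq : ∀ c ∈ PySem.List.pyRange hb (hb + 200 + 1) 1,
          pvFitsB cx cy c pts = true → c = v := by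
        intro c _ hc
        rw [pvFitsB, List.all_eq_true] at hc
        have := hc _ hmem
        simp only [hph, if_pos] at this
        simpa [hv] using this
      have := pvFindSome_unique (fun c => pvFitsB cx cy c pts) (fun c => [cx, cy, c]) v
        (PySem.List.pyRange hb (hb + 200 + 1) 1) huniq
      simp only [pvCheckA_eq]
      rw [this]
      simp only [PySem.List.mem_pyRange_one]
      rw [← hv]
      by_cases hcond : hb ≤ v ∧ v ≤ hb + 200 ∧ pvFitsB cx cy v pts = true
      · rw [if_pos ⟨⟨hcond.1, by omega⟩, hcond.2.2⟩, if_pos hcond]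
      · rw [if_neg (by intro ⟨⟨h1, h2⟩, h3⟩; exact hcond ⟨h1, by omega, h3⟩),
            if_neg (by intro ⟨h1, h2, h3⟩; exact hcond ⟨h1, h2, h3⟩)]
    | none =>
      have hall : ∀ t ∈ pts, ¬ (t.2.2 > 0) := by
        intro t ht
        have := List.find?_eq_none.mp hpos t ht
        simpa using this
      -- verifier is antitone in ch over the no-positive point set
      have hmono : ∀ c : Int, hb ≤ c → pvFitsB cx cy c pts = true → pvFitsB cx cy hb pts = true := by
        intro c hbc hc
        rw [pvFitsB, List.all_eq_true] at *
        intro t ht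
        have h1 := hc t ht
        have h2 := hall t ht
        simp only [if_neg h2] at h1 ⊢
        by_cases h3 : t.2.2 = 0
        · simp only [if_pos h3] at h1 ⊢
          simp at h1 ⊢
          omega
        · simp [h3]
      rw [PySem.List.pyRange_one_cons (by omega : hb < hb + 200 + 1)]
      rw [List.findSome?_cons]
      simp only [pvCheckA_eq]
      by_cases hp : pvFitsB cx cy hb pts = true
      · have hcond : hb ≤ hb ∧ hb ≤ hb + 200 ∧ pvFitsB cx cy hb pts = true :=
          ⟨le_refl hb, by omega, hp⟩
        rw [if_pos hcond]
        simp [hp]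
      · have hncond : ¬ (hb ≤ hb ∧ hb ≤ hb + 200 ∧ pvFitsB cx cy hb pts = true) :=
          fun hcj => hp hcj.2.2
        rw [if_neg hncond]
        have hp' : pvFitsB cx cy hb pts = false := by simpa using hp
        simp only [hp', Bool.false_eq_true, if_false]
        apply List.findSome?_eq_none_iff.mpr
        intro c hc
        have hcm : hb + 1 ≤ c := (PySem.List.mem_pyRange_one.mp hc).1
        have : pvFitsB cx cy c pts = false := by
          by_contra hcc
          exact hp (hmono c (by omega) (by simpa using hcc))
        simp [this]

-- ===== VERDICT (by name: the statement is the Claim_ definition above) =====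
theorem loop_xyh_N_spec : Claim_equal_loop_xyh_N := by
  intro x y h_ _ _
  exact loop_xyh_N_spec' x y h_
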